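-- pv_equiv track=rewrite | github.com/AmpliconSuite/AmpliconClassifier | scripts/results_comparator.py | calculate_interval_intersection
-- ===== SOURCE A (Python) =====
-- from typing import List, Tuple, Dict, Set, Optional
--
-- def calculate_interval_intersection(intervals1: List[Tuple[int, int]], intervals2: List[Tuple[int, int]]) -> int:
--     """Calculate total base pairs of intersection between two interval sets."""
--     total_intersection = 0
--
--     for start1, end1 in intervals1:
--         for start2, end2 in intervals2:
--             overlap_start = max(start1, start2)
--             overlap_end = min(end1, end2)
--             if overlap_end > overlap_start:
--                 total_intersection += overlap_end - overlap_start
--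
--     return total_intersection
-- ===== SOURCE B (Python) =====
-- def calculate_interval_intersection(intervals1, intervals2):
--     """Coordinate sweep: sort boundary events, integrate c1*c2 over segments."""
--     events = []
--     for s, e in intervals1:
--         if s < e:
--             events.append((s, 0, 1))
--             events.append((e, 0, -1))
--     for s, e in intervals2:
--         if s < e:
--             events.append((s, 1, 1))
--             events.append((e, 1, -1))
--     events.sort(key=lambda ev: ev[0])
--     total = 0
--     c1 = 0
--     c2 = 0
--     prev = 0
--     for x, which, d in events:
--         total += (x - prev) * c1 * c2
--         if which == 0:
--             c1 += d
--         else: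
--             c2 += d
--         prev = x
--     return total
-- ===== Notes on version B (the rewrite author's own statement) =====
-- stated objective: faster
-- what changed: Replaced the O(n*m) all-pairs overlap accumulation by a single coordinate sweep over the sorted interval endpoints that integrates the product of the two coverage counts, using the identity sum-of-pairwise-overlaps = integral of c1(x)*c2(x).
import Mathlib
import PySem

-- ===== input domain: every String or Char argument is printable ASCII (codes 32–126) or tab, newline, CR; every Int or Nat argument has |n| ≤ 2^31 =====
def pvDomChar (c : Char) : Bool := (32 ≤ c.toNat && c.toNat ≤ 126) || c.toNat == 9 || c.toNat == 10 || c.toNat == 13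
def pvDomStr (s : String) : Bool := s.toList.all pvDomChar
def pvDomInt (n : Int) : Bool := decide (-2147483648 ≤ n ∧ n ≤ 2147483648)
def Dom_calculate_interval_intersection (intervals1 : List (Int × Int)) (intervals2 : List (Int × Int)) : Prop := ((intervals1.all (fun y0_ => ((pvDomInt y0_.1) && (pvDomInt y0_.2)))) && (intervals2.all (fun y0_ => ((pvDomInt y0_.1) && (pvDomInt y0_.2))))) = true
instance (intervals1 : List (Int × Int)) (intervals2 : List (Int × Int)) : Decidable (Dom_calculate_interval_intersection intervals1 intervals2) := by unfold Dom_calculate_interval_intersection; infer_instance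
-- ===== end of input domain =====

-- B replaces A's O(n*m) all-pairs overlap accumulation by a sorted-endpoint coordinate
-- sweep integrating the product of the two coverage counts (objective: faster, asymptotic).

-- ===== PORT A =====
-- literal transliteration of A's nested loops
def calculate_interval_intersection (intervals1 : List (Int × Int)) (intervals2 : List (Int × Int)) : Int :=
  intervals1.foldl (fun total_intersection p =>
    intervals2.foldl (fun total_intersection q =>
      let overlap_start := max p.1 q.1
      let overlap_end := min p.2 q.2
      if overlap_start < overlap_end then total_intersection + (overlap_end - overlap_start)
      else total_intersection) total_intersection) 0

-- ===== PORT B =====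
-- literal transliteration of Source B: build boundary events, sort by coordinate,
-- sweep once maintaining the two coverage counts c1, c2.
def calculate_interval_intersection_alt (intervals1 : List (Int × Int)) (intervals2 : List (Int × Int)) : Int :=
  let events : List (Int × Int × Int) :=
    intervals1.foldl (fun acc p =>
      if p.1 < p.2 then acc ++ [(p.1, (0 : Int), (1 : Int)), (p.2, (0 : Int), (-1 : Int))] else acc) []
  let events :=
    intervals2.foldl (fun acc p =>
      if p.1 < p.2 then acc ++ [(p.1, (1 : Int), (1 : Int)), (p.2, (1 : Int), (-1 : Int))] else acc) events
  let sortedEvents := PySem.List.sorted events (fun e => e.1) false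
  -- state: (total, c1, c2, prev)
  let st := sortedEvents.foldl (fun (st : Int × Int × Int × Int) e =>
      (st.1 + (e.1 - st.2.2.2) * st.2.1 * st.2.2.1,
       if e.2.1 = 0 then st.2.1 + e.2.2 else st.2.1,
       if e.2.1 = 0 then st.2.2.1 else st.2.2.1 + e.2.2,
       e.1)) ((0 : Int), (0 : Int), (0 : Int), (0 : Int))
  st.1

-- ===== PRECONDITION & SPEC =====
def Spec_calculate_interval_intersection (intervals1 : List (Int × Int)) (intervals2 : List (Int × Int)) (out : Int) : Prop := out = calculate_interval_intersection_alt intervals1 intervals2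
instance (intervals1 : List (Int × Int)) (intervals2 : List (Int × Int)) (out : Int) : Decidable (Spec_calculate_interval_intersection intervals1 intervals2 out) := by unfold Spec_calculate_interval_intersection; infer_instance

-- ===== CLAIM (what is proved, stated in full; the proofs are below) =====
def Claim_equal_calculate_interval_intersection : Prop := ∀ (intervals1 : List (Int × Int)) (intervals2 : List (Int × Int)), Dom_calculate_interval_intersection intervals1 intervals2 → Spec_calculate_interval_intersection intervals1 intervals2 (calculate_interval_intersection intervals1 intervals2)

-- ===== LEMMAS AND PROOFS =====

-- proof-side vocabulary
def pvEv (w : Int) (p : Int × Int) : List (Int × Int × Int) :=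
  [(p.1, w, (1 : Int)), (p.2, w, (-1 : Int))]

def pvEvents (w : Int) (I : List (Int × Int)) : List (Int × Int × Int) :=
  (I.filter (fun p => decide (p.1 < p.2))).flatMap (pvEv w)

def pvF (p q : Int × Int) : Int :=
  if max p.1 q.1 < min p.2 q.2 then min p.2 q.2 - max p.1 q.1 else 0

def pvCross (M N : List (Int × Int × Int)) : Int :=
  (M.map (fun a => (N.map (fun b => -(a.2.2 * b.2.2 * max a.1 b.1))).sum)).sum

def pvDSum (M : List (Int × Int × Int)) : Int := (M.map (fun e => e.2.2)).sum

def pvSel0 (L : List (Int × Int × Int)) : List (Int × Int × Int) :=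
  L.filter (fun e => decide (e.2.1 = 0))
def pvSel1 (L : List (Int × Int × Int)) : List (Int × Int × Int) :=
  L.filter (fun e => decide (¬ e.2.1 = 0))

def pvLin (X : Int) (M : List (Int × Int × Int)) : Int :=
  (M.map (fun e => e.2.2 * (X - e.1))).sum

def pvQuad (X : Int) (M N : List (Int × Int × Int)) : Int :=
  (M.map (fun a => (N.map (fun b => a.2.2 * b.2.2 * (X - max a.1 b.1))).sum)).sum

def pvClosed (L : List (Int × Int × Int)) (c1 c2 prev : Int) : Int :=
  match L.getLast? with
  | none => 0
  | some l =>
      c1 * c2 * (l.1 - prev) + c1 * pvLin l.1 (pvSel1 L) + c2 * pvLin l.1 (pvSel0 L)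
        + pvQuad l.1 (pvSel0 L) (pvSel1 L)

-- A as a double sum
lemma pvA_eq_sum (I1 I2 : List (Int × Int)) :
    calculate_interval_intersection I1 I2
      = (I1.map (fun p => (I2.map (fun q => pvF p q)).sum)).sum := by
  unfold calculate_interval_intersection
  have hin : ∀ (p : Int × Int) (t : Int),
      I2.foldl (fun total_intersection q =>
        let overlap_start := max p.1 q.1
        let overlap_end := min p.2 q.2
        if overlap_start < overlap_end then total_intersection + (overlap_end - overlap_start)
        else total_intersection) t = t + (I2.map (fun q => pvF p q)).sum := by
    intro p t
    induction I2 generalizing t with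
    | nil => simp
    | cons q Q ih =>
        simp only [List.foldl_cons, List.map_cons, List.sum_cons]
        rw [ih]
        dsimp only [pvF]
        split_ifs <;> ring
  simp only [hin]
  rw [PySem.List.foldl_add _ _ _]
  simp

-- per-pair identity: the overlap is the 2×2 event cross term
lemma pvF_eq_cross (p q : Int × Int) (hp : p.1 < p.2) (hq : q.1 < q.2) :
    pvF p q = pvCross (pvEv 0 p) (pvEv 1 q) := by
  simp only [pvF, pvCross, pvEv, List.map_cons, List.map_nil, List.sum_cons, List.sum_nil]
  split_ifs with h <;> push_cast <;> ring_nf <;> omega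

-- bilinearity of pvCross
lemma pvCross_append_left (xs ys N : List (Int × Int × Int)) :
    pvCross (xs ++ ys) N = pvCross xs N + pvCross ys N := by
  simp [pvCross]
lemma pvCross_append_right (M xs ys : List (Int × Int × Int)) :
    pvCross M (xs ++ ys) = pvCross M xs + pvCross M ys := by
  simp only [pvCross, List.map_append, List.sum_append, PySem.List.sum_map_add_int]
lemma pvCross_flatMap_left {α : Type} (P : List α) (h : α → List (Int × Int × Int)) (N : List (Int × Int × Int)) :
    pvCross (P.flatMap h) N = (P.map (fun p => pvCross (h p) N)).sum := by
  induction P with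
  | nil => simp [pvCross]
  | cons p P ih => simp [List.flatMap_cons, pvCross_append_left, ih]
lemma pvCross_flatMap_right {α : Type} (M : List (Int × Int × Int)) (Q : List α) (h : α → List (Int × Int × Int)) :
    pvCross M (Q.flatMap h) = (Q.map (fun q => pvCross M (h q))).sum := by
  induction Q with
  | nil => simp [pvCross]
  | cons q Q ih => simp [List.flatMap_cons, pvCross_append_right, ih]

-- dropping the invalid intervals from a sum of zeros
lemma pv_sum_filter {α : Type} (L : List α) (c : α → Bool) (g : α → Int)
    (h : ∀ x ∈ L, c x = false → g x = 0) :
    (L.map g).sum = ((L.filter c).map g).sum := by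
  induction L with
  | nil => rfl
  | cons x L ih =>
      by_cases hx : c x
      · simp [hx, ih (fun y hy => h y (List.mem_cons_of_mem x hy))]
      · simp only [Bool.not_eq_true] at hx
        simp [hx, h x (List.mem_cons_self) hx,
          ih (fun y hy => h y (List.mem_cons_of_mem x hy))]

-- A equals the cross-sum over all events
lemma pvA_eq_cross (I1 I2 : List (Int × Int)) :
    calculate_interval_intersection I1 I2 = pvCross (pvEvents 0 I1) (pvEvents 1 I2) := by
  rw [pvA_eq_sum]
  have hz : ∀ p : Int × Int, ¬ p.1 < p.2 → ∀ q : Int × Int, pvF p q = 0 := by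
    intro p hp q
    simp only [pvF]
    split_ifs with h
    · exfalso; omega
    · rfl
  rw [pv_sum_filter I1 (fun p => decide (p.1 < p.2)) _
    (by
      intro x hx hcx
      simp only [decide_eq_false_iff_not] at hcx
      simp [hz x hcx])]
  have hz2 : ∀ q : Int × Int, ¬ q.1 < q.2 → ∀ p : Int × Int, pvF p q = 0 := by
    intro q hq p
    simp only [pvF]
    split_ifs with h
    · exfalso; omega
    · rfl
  rw [show pvEvents 0 I1 = (I1.filter (fun p => decide (p.1 < p.2))).flatMap (pvEv 0) from rfl,
    pvCross_flatMap_left]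
  refine congrArg List.sum (List.map_congr_left ?_)
  intro p hp
  rw [List.mem_filter] at hp
  have hpv : p.1 < p.2 := by simpa using hp.2
  rw [pv_sum_filter I2 (fun q => decide (q.1 < q.2)) _
    (by
      intro x hx hcx
      simp only [decide_eq_false_iff_not] at hcx
      exact hz2 x hcx p)]
  rw [show pvEvents 1 I2 = (I2.filter (fun q => decide (q.1 < q.2))).flatMap (pvEv 1) from rfl,
    pvCross_flatMap_right]
  refine congrArg List.sum (List.map_congr_left ?_)
  intro q hq
  rw [List.mem_filter] at hq
  exact pvF_eq_cross p q hpv (by simpa using hq.2)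

-- event list built by the B port
lemma pvEvents_built (I1 I2 : List (Int × Int)) :
    (I2.foldl (fun acc p =>
        if p.1 < p.2 then acc ++ [(p.1, (1 : Int), (1 : Int)), (p.2, (1 : Int), (-1 : Int))] else acc)
      (I1.foldl (fun acc p =>
        if p.1 < p.2 then acc ++ [(p.1, (0 : Int), (1 : Int)), (p.2, (0 : Int), (-1 : Int))] else acc) []))
      = pvEvents 0 I1 ++ pvEvents 1 I2 := by
  rw [PySem.List.foldl_ite_eq_foldl_filter, PySem.List.foldl_ite_eq_foldl_filter,
    PySem.List.foldl_append_eq_flatMap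
      (g := fun p : Int × Int => [(p.1, (0 : Int), (1 : Int)), (p.2, (0 : Int), (-1 : Int))]),
    PySem.List.foldl_append_eq_flatMap
      (g := fun p : Int × Int => [(p.1, (1 : Int), (1 : Int)), (p.2, (1 : Int), (-1 : Int))])]
  simp only [List.nil_append, pvEvents]
  rfl

lemma pvLin_cons (X : Int) (e : Int × Int × Int) (M : List (Int × Int × Int)) :
    pvLin X (e :: M) = e.2.2 * (X - e.1) + pvLin X M := by
  simp [pvLin]

lemma pvQuad_cons_left (X : Int) (e : Int × Int × Int) (M N : List (Int × Int × Int)) :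
    pvQuad X (e :: M) N = (N.map (fun b => e.2.2 * b.2.2 * (X - max e.1 b.1))).sum + pvQuad X M N := by
  simp [pvQuad]

lemma pvQuad_cons_right (X : Int) (e : Int × Int × Int) (M N : List (Int × Int × Int)) :
    pvQuad X M (e :: N) = (M.map (fun a => a.2.2 * e.2.2 * (X - max a.1 e.1))).sum + pvQuad X M N := by
  simp only [pvQuad, List.map_cons, List.sum_cons, PySem.List.sum_map_add_int]

lemma pv_row_left (X d x : Int) (N : List (Int × Int × Int)) (h : ∀ b ∈ N, x ≤ b.1) :
    ((N.map (fun b => d * b.2.2 * (X - max x b.1))).sum : Int) = d * pvLin X N := by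
  induction N with
  | nil => simp [pvLin]
  | cons b N ih =>
      simp only [List.map_cons, List.sum_cons, pvLin] at *
      rw [max_eq_right (h b List.mem_cons_self), ih (fun y hy => h y (List.mem_cons_of_mem b hy))]
      ring

lemma pv_row_right (X d x : Int) (M : List (Int × Int × Int)) (h : ∀ a ∈ M, x ≤ a.1) :
    ((M.map (fun a => a.2.2 * d * (X - max a.1 x))).sum : Int) = d * pvLin X M := by
  induction M with
  | nil => simp [pvLin]
  | cons a M ih =>
      simp only [List.map_cons, List.sum_cons, pvLin] at *
      rw [max_eq_left (h a List.mem_cons_self), ih (fun y hy => h y (List.mem_cons_of_mem a hy))]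
      ring

-- the sweep's closed form (sorted input)
lemma pv_sweep_closed (L : List (Int × Int × Int)) :
    ∀ (t c1 c2 prev : Int), L.Pairwise (fun a b => a.1 ≤ b.1) →
    (L.foldl (fun (st : Int × Int × Int × Int) e =>
      (st.1 + (e.1 - st.2.2.2) * st.2.1 * st.2.2.1,
       if e.2.1 = 0 then st.2.1 + e.2.2 else st.2.1,
       if e.2.1 = 0 then st.2.2.1 else st.2.2.1 + e.2.2,
       e.1)) (t, c1, c2, prev)).1 = t + pvClosed L c1 c2 prev := by
  induction L with
  | nil => intro t c1 c2 prev _; simp [pvClosed]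
  | cons e L ih =>
      intro t c1 c2 prev hp
      rw [List.pairwise_cons] at hp
      obtain ⟨hef, hL⟩ := hp
      rw [List.foldl_cons]
      dsimp only
      rw [ih _ _ _ _ hL]
      rcases hLast : L.getLast? with _ | l
      · have hnil : L = [] := List.getLast?_eq_none_iff.mp hLast
        subst hnil
        by_cases hw : e.2.1 = 0 <;>
          simp [pvClosed, pvSel0, pvSel1, pvLin, pvQuad, hw] <;> ring
      · have hLast2 : (e :: L).getLast? = some l := by
          cases L with
          | nil => simp at hLast
          | cons f L' => rw [List.getLast?_cons_cons]; exact hLast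
        have hmem0 : ∀ b ∈ pvSel0 L, e.1 ≤ b.1 := fun b hb => hef b (List.mem_of_mem_filter hb)
        have hmem1 : ∀ b ∈ pvSel1 L, e.1 ≤ b.1 := fun b hb => hef b (List.mem_of_mem_filter hb)
        by_cases hw : e.2.1 = 0
        · have hs0 : pvSel0 (e :: L) = e :: pvSel0 L := by simp [pvSel0, hw]
          have hs1 : pvSel1 (e :: L) = pvSel1 L := by simp [pvSel1, hw]
          simp only [pvClosed, hLast, hLast2, hs0, hs1, hw, if_true, pvLin_cons, pvQuad_cons_left]
          rw [pv_row_left l.1 e.2.2 e.1 (pvSel1 L) hmem1]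
          ring
        · have hs0 : pvSel0 (e :: L) = pvSel0 L := by simp [pvSel0, hw]
          have hs1 : pvSel1 (e :: L) = e :: pvSel1 L := by simp [pvSel1, hw]
          simp only [pvClosed, hLast, hLast2, hs0, hs1, hw, if_false, pvLin_cons, pvQuad_cons_right]
          rw [pv_row_right l.1 e.2.2 e.1 (pvSel0 L) hmem0]
          ring

-- quad = cross + X · (Σd)(Σd)
lemma pvQuad_eq (X : Int) (M N : List (Int × Int × Int)) :
    pvQuad X M N = pvCross M N + X * pvDSum M * pvDSum N := by
  have hrow : ∀ a : Int × Int × Int,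
      ((N.map (fun b => a.2.2 * b.2.2 * (X - max a.1 b.1))).sum : Int)
        = (N.map (fun b => -(a.2.2 * b.2.2 * max a.1 b.1))).sum + X * a.2.2 * pvDSum N := by
    intro a
    induction N with
    | nil => simp [pvDSum]
    | cons b N ih =>
        simp only [List.map_cons, List.sum_cons, pvDSum] at ih ⊢
        rw [ih]; ring
  unfold pvQuad pvCross
  induction M with
  | nil => simp [pvDSum]
  | cons a M ih =>
      simp only [List.map_cons, List.sum_cons, pvDSum] at ih ⊢
      rw [ih, hrow a]; simp only [pvDSum]; ring

lemma pvDSum_events (w : Int) (I : List (Int × Int)) : pvDSum (pvEvents w I) = 0 := by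
  unfold pvEvents
  induction I.filter (fun p => decide (p.1 < p.2)) with
  | nil => rfl
  | cons p P ih => simp [pvDSum, pvEv, List.flatMap_cons] at ih ⊢; omega

lemma pvQuad_perm (X : Int) {M M' N N' : List (Int × Int × Int)}
    (hM : M.Perm M') (hN : N.Perm N') : pvQuad X M N = pvQuad X M' N' := by
  calc pvQuad X M N = pvQuad X M' N := (hM.map _).sum_eq
    _ = pvQuad X M' N' := by
        unfold pvQuad
        exact congrArg _ (List.map_congr_left (fun a _ => (hN.map _).sum_eq))

lemma pv_mem_events_which (w : Int) (I : List (Int × Int)) :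
    ∀ e ∈ pvEvents w I, e.2.1 = w := by
  intro e he
  simp only [pvEvents, List.mem_flatMap] at he
  obtain ⟨p, -, hp⟩ := he
  simp only [pvEv, List.mem_cons] at hp
  rcases hp with h | h | h
  · simp [h]
  · simp [h]
  · simp at h

-- ===== VERDICT (by name: the statement is the Claim_ definition above) =====
theorem calculate_interval_intersection_spec : Claim_equal_calculate_interval_intersection := by
  intro I1 I2 _
  unfold Spec_calculate_interval_intersection
  rw [pvA_eq_cross]
  simp only [calculate_interval_intersection_alt]
  rw [pvEvents_built]
  have hpair : (PySem.List.sorted (pvEvents 0 I1 ++ pvEvents 1 I2) (fun e => e.1) false).Pairwise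
      (fun a b : Int × Int × Int => a.1 ≤ b.1) := PySem.List.sorted_pairwise _ _
  rw [pv_sweep_closed _ 0 0 0 0 hpair]
  have hperm : (PySem.List.sorted (pvEvents 0 I1 ++ pvEvents 1 I2) (fun e => e.1) false).Perm
      (pvEvents 0 I1 ++ pvEvents 1 I2) := PySem.List.sorted_perm _ _ _
  rcases hLast : (PySem.List.sorted (pvEvents 0 I1 ++ pvEvents 1 I2) (fun e => e.1) false).getLast? with _ | l
  · have hnil : PySem.List.sorted (pvEvents 0 I1 ++ pvEvents 1 I2) (fun e => e.1) false = [] :=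
      List.getLast?_eq_none_iff.mp hLast
    have hev : pvEvents 0 I1 ++ pvEvents 1 I2 = [] := by
      have := hperm
      rw [hnil] at this
      exact (this.nil_eq).symm
    obtain ⟨h1, h2⟩ := List.append_eq_nil_iff.mp hev
    simp [pvClosed, pvCross, h1, h2,
      show PySem.List.sorted ([] : List (Int × Int × Int)) (fun e => e.1) false = [] from rfl]
  · have hs0 : (pvSel0 (PySem.List.sorted (pvEvents 0 I1 ++ pvEvents 1 I2) (fun e => e.1) false)).Perm
        (pvEvents 0 I1) := by
      have h := hperm.filter (fun e : Int × Int × Int => decide (e.2.1 = 0))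
      rw [List.filter_append] at h
      have hE1 : (pvEvents 0 I1).filter (fun e : Int × Int × Int => decide (e.2.1 = 0)) = pvEvents 0 I1 :=
        List.filter_eq_self.mpr (by intro a ha; simp [pv_mem_events_which 0 I1 a ha])
      have hE2 : (pvEvents 1 I2).filter (fun e : Int × Int × Int => decide (e.2.1 = 0)) = [] :=
        List.filter_eq_nil_iff.mpr (by intro a ha; simp [pv_mem_events_which 1 I2 a ha])
      rw [hE1, hE2] at h
      simpa [pvSel0] using h
    have hs1 : (pvSel1 (PySem.List.sorted (pvEvents 0 I1 ++ pvEvents 1 I2) (fun e => e.1) false)).Perm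
        (pvEvents 1 I2) := by
      have h := hperm.filter (fun e : Int × Int × Int => decide (¬ e.2.1 = 0))
      rw [List.filter_append] at h
      have hE1 : (pvEvents 0 I1).filter (fun e : Int × Int × Int => decide (¬ e.2.1 = 0)) = [] :=
        List.filter_eq_nil_iff.mpr (by intro a ha; simp [pv_mem_events_which 0 I1 a ha])
      have hE2 : (pvEvents 1 I2).filter (fun e : Int × Int × Int => decide (¬ e.2.1 = 0)) = pvEvents 1 I2 :=
        List.filter_eq_self.mpr (by intro a ha; simp [pv_mem_events_which 1 I2 a ha])
      rw [hE1, hE2] at h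
      simpa [pvSel1] using h
    simp only [pvClosed, hLast]
    rw [pvQuad_perm l.1 hs0 hs1, pvQuad_eq, pvDSum_events, pvDSum_events]
    ring
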